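-- pv_equiv track=rewrite | github.com/abhishek2025-glitch/Test1 | src/topics_manager.py | _prioritize_topics
-- ===== SOURCE A (Python) =====
-- from typing import Dict, List, Set, Optional, Tuple
--
-- def _prioritize_topics(topics: List[str]) -> List[str]:
--     """Prioritize topics for better repository discoverability."""
--     # Priority order (most important first)
--     priority_order = [
--         "ai", "automation", "python", "nodejs", "react", "golang",
--         "api", "cli", "data-science", "machine-learning", "open-source"
--     ]
--
--     # Sort by priority, then alphabetically
--     topics_set = set(topics)
--     prioritized = []
--
--     for priority_topic in priority_order:
--         if priority_topic in topics_set: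
--             prioritized.append(priority_topic)
--             topics_set.remove(priority_topic)
--
--     # Add remaining topics alphabetically
--     remaining = sorted(list(topics_set))
--     prioritized.extend(remaining)
--
--     return prioritized
-- ===== SOURCE B (Python) =====
-- from typing import Dict, List, Set, Optional, Tuple
--
-- def _prioritize_topics(topics: List[str]) -> List[str]:
--     """Prioritize topics for better repository discoverability."""
--     priority_order = [
--         "ai", "automation", "python", "nodejs", "react", "golang",
--         "api", "cli", "data-science", "machine-learning", "open-source"
--     ]
--     rank = {t: i for i, t in enumerate(priority_order)}
--     return sorted(set(topics), key=lambda t: (rank.get(t, len(priority_order)), t))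
-- ===== Notes on version B (the rewrite author's own statement) =====
-- stated objective: simpler
-- what changed: A's explicit priority-membership loop with incremental set removal followed by a separate alphabetical sort of the leftovers is replaced by one composite-key sort over a precomputed rank table (priority index, topic).
import Mathlib
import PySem

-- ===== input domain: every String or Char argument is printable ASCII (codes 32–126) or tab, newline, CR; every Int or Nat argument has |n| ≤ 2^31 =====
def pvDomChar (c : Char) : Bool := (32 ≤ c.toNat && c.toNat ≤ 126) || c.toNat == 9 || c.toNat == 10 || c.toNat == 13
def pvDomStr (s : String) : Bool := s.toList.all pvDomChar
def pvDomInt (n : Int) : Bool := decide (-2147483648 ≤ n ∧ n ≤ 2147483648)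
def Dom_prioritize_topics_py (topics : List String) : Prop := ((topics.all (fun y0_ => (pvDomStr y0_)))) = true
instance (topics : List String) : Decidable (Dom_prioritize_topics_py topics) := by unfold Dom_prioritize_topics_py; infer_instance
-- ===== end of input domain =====

-- B replaces A's priority-membership loop plus separate alphabetical sort by one composite-key sort
-- over a precomputed rank table (objective: simpler).


-- the priority_order literal shared by both Pythons
def pvPriorityOrder : List String :=
  ["ai", "automation", "python", "nodejs", "react", "golang",
   "api", "cli", "data-science", "machine-learning", "open-source"]

-- ===== PORT A =====
-- 'topics_set.remove(t)' runs only under the membership guard, where it equals Set.discard (exact).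
def prioritize_topics_py (topics : List String) : List String :=
  let topics_set : PySem.Set String := PySem.Set.ofList topics
  let st :=
    pvPriorityOrder.foldl
      (fun (st : List String × PySem.Set String) pt =>
        if PySem.Set.contains st.2 pt then (st.1 ++ [pt], PySem.Set.discard st.2 pt) else st)
      ([], topics_set)
  st.1 ++ PySem.List.sorted st.2 (fun x => x) false

-- ===== PORT B =====
def pvRank : PySem.Dict String Int :=
  (PySem.List.enumerate pvPriorityOrder).foldl
    (fun d it => PySem.Dict.insert d it.2 it.1) PySem.Dict.empty

def prioritize_topics_py_alt (topics : List String) : List String :=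
  PySem.List.sorted2 (PySem.Set.ofList topics)
    (fun t => PySem.Dict.getD pvRank t ((pvPriorityOrder.length : Int)))
    (fun t => t) false

-- ===== PRECONDITION & SPEC =====
def Spec_prioritize_topics_py (topics : List String) (out : List String) : Prop := out = prioritize_topics_py_alt topics
instance (topics : List String) (out : List String) : Decidable (Spec_prioritize_topics_py topics out) := by unfold Spec_prioritize_topics_py; infer_instance

-- ===== CLAIM (what is proved, stated in full; the proofs are below) =====
def Claim_equal_prioritize_topics_py : Prop := ∀ (topics : List String), Dom_prioritize_topics_py topics → Spec_prioritize_topics_py topics (prioritize_topics_py topics)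

-- ===== LEMMAS AND PROOFS =====

-- the composite key B sorts by, packed into one linearly ordered type
def pvKey (t : String) : Lex (Int × String) :=
  toLex (PySem.Dict.getD pvRank t ((pvPriorityOrder.length : Int)), t)

-- A's priority loop, fully characterised: appended hits in priority order, leftovers filtered out
lemma pvLoopA (P : List String) (hP : P.Nodup) (acc : List String) (s : List String) :
    P.foldl
      (fun (st : List String × PySem.Set String) pt =>
        if PySem.Set.contains st.2 pt then (st.1 ++ [pt], PySem.Set.discard st.2 pt) else st)
      (acc, s)
    = (acc ++ P.filter (fun t => decide (t ∈ s)), s.filter (fun x => decide (x ∉ P))) := by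
  induction P generalizing acc s with
  | nil => simp
  | cons t rest ih =>
    rcases List.nodup_cons.mp hP with ⟨ht, hrest⟩
    simp only [List.foldl_cons, List.filter_cons]
    by_cases h : t ∈ s
    · have hc : PySem.Set.contains s t = true := by
        simp [PySem.Set.contains, h]
      rw [if_pos hc, ih hrest]
      simp only [h, decide_true, if_true, Prod.mk.injEq, List.append_assoc, List.singleton_append]
      refine ⟨?_, ?_⟩
      · congr 1
        congr 1
        apply List.filter_congr
        intro u hu
        have hne : u ≠ t := fun he => ht (he ▸ hu)
        simp [PySem.Set.mem_discard, hne]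
      · rw [show PySem.Set.discard s t = s.filter (fun y => !(y == t)) from rfl,
            List.filter_filter]
        apply List.filter_congr
        intro u _
        by_cases he : u = t <;> simp [he]
    · rw [if_neg (by simpa using h), ih hrest]
      simp only [h, decide_false, Bool.false_eq_true, if_false, Prod.mk.injEq, true_and]
      apply List.filter_congr
      intro u hu
      have hne : u ≠ t := fun he => h (he ▸ hu)
      simp [hne]

lemma pvRank_keys : pvRank.keys = pvPriorityOrder := by decide

-- a topic outside the priority list gets the default rank
lemma pvRank_default {t : String} (h : t ∉ pvPriorityOrder) :
    PySem.Dict.getD pvRank t ((pvPriorityOrder.length : Int)) = (pvPriorityOrder.length : Int) := by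
  apply PySem.Dict.getD_of_not_contains
  rw [PySem.Dict.contains_eq_decide_mem_keys, pvRank_keys]
  simpa using h

-- priority topics have strictly increasing ranks, all smaller than the default
lemma pvRank_pairwise :
    pvPriorityOrder.Pairwise
      (fun a b => PySem.Dict.getD pvRank a ((pvPriorityOrder.length : Int))
                < PySem.Dict.getD pvRank b ((pvPriorityOrder.length : Int))) := by
  decide

lemma pvRank_lt : ∀ t ∈ pvPriorityOrder,
    PySem.Dict.getD pvRank t ((pvPriorityOrder.length : Int)) < (pvPriorityOrder.length : Int) := by
  decide

-- sorted2 with an identity tie-break is sorted by the packed lexicographic key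
lemma pvSorted2_eq_sorted (xs : List String) (k1 : String → Int) :
    PySem.List.sorted2 xs k1 (fun t => t) false
      = PySem.List.sorted xs (fun t => toLex ((k1 t, t) : Int × String)) false := by
  show xs.foldl (fun acc x => PySem.List.insertBy _ x acc) [] = xs.foldl (fun acc x => PySem.List.insertBy _ x acc) []
  have h : (fun a b : String => decide (k1 a < k1 b) || (!decide (k1 b < k1 a) && decide (a < b)))
      = (fun a b : String => decide (toLex ((k1 a, a) : Int × String) < toLex ((k1 b, b) : Int × String))) := by
    funext a b
    rcases lt_trichotomy (k1 a) (k1 b) with h1 | h1 | h1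
    · simp [Prod.Lex.toLex_lt_toLex, h1, not_lt.mpr h1.le]
    · simp [Prod.Lex.toLex_lt_toLex, h1]
    · simp [Prod.Lex.toLex_lt_toLex, not_lt.mpr h1.le, h1, h1.ne']
  rw [h]

theorem pv_main (topics : List String) :
    prioritize_topics_py topics = prioritize_topics_py_alt topics := by
  have hPnd : pvPriorityOrder.Nodup := by decide
  unfold prioritize_topics_py prioritize_topics_py_alt
  rw [pvSorted2_eq_sorted]
  simp only [pvLoopA pvPriorityOrder hPnd]
  set S : List String := PySem.Set.ofList topics with hS
  have hSnd : S.Nodup := PySem.Set.nodup_ofList topics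
  set hits : List String := pvPriorityOrder.filter (fun t => decide (t ∈ S)) with hhits
  set rest : List String := S.filter (fun x => decide (x ∉ pvPriorityOrder)) with hrest
  set srest : List String := PySem.List.sorted rest (fun x => x) false with hsrest
  have hsp : srest.Perm rest := PySem.List.sorted_perm rest (fun x => x) false
  -- permutation: hits ++ srest is a rearrangement of S
  have hperm : (hits ++ srest).Perm S := by
    have h1 : hits.Perm (S.filter (fun x => decide (x ∈ pvPriorityOrder))) := by
      rw [List.perm_ext_iff_of_nodup (hPnd.filter _) (hSnd.filter _)]
      intro a
      simp only [List.mem_filter, decide_eq_true_eq]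
      tauto
    have h2 : (S.filter (fun x => decide (x ∈ pvPriorityOrder)) ++
        S.filter (fun x => !decide (x ∈ pvPriorityOrder))).Perm S :=
      List.filter_append_perm _ S
    have h3 : rest = S.filter (fun x => !decide (x ∈ pvPriorityOrder)) := by
      rw [hrest]; apply List.filter_congr; intro u _; simp
    have h4 : (hits ++ srest).Perm (S.filter (fun x => decide (x ∈ pvPriorityOrder)) ++
        S.filter (fun x => !decide (x ∈ pvPriorityOrder))) := by
      rw [← h3]; exact h1.append hsp
    exact h4.trans h2
  -- order: hits ++ srest is strictly increasing under the packed key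
  have hpw : (hits ++ srest).Pairwise (fun a b => pvKey a < pvKey b) := by
    rw [List.pairwise_append]
    refine ⟨?_, ?_, ?_⟩
    · exact (List.Pairwise.sublist List.filter_sublist pvRank_pairwise).imp
        (fun h => by exact Prod.Lex.toLex_lt_toLex.mpr (Or.inl h))
    · have hle : srest.Pairwise (fun a b : String => a ≤ b) :=
        PySem.List.sorted_pairwise rest (fun x => x)
      have hnd : srest.Pairwise (fun a b : String => a ≠ b) := (hsp.nodup_iff.mpr (hSnd.filter _))
      refine (hle.and hnd).imp_of_mem ?_
      intro a b ha hb hab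
      have ha' : a ∉ pvPriorityOrder := by
        have := List.of_mem_filter (hsp.mem_iff.mp ha); simpa using this
      have hb' : b ∉ pvPriorityOrder := by
        have := List.of_mem_filter (hsp.mem_iff.mp hb); simpa using this
      exact Prod.Lex.toLex_lt_toLex.mpr
        (Or.inr ⟨by rw [pvRank_default ha', pvRank_default hb'],
                 lt_of_le_of_ne hab.1 hab.2⟩)
    · intro a ha b hb
      have ha' : a ∈ pvPriorityOrder := (List.mem_filter.mp ha).1
      have hb' : b ∉ pvPriorityOrder := by
        have := List.of_mem_filter (hsp.mem_iff.mp hb); simpa using this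
      exact Prod.Lex.toLex_lt_toLex.mpr
        (Or.inl (by rw [pvRank_default hb']; exact pvRank_lt a ha'))
  rw [show ((PySem.List.sorted S (fun t => toLex ((pvRank.getD t (pvPriorityOrder.length : Int), t) : Int × String)) false))
      = PySem.List.sorted S pvKey false from rfl,
    PySem.List.sorted_eq_of_perm_of_pairwise_lt S (hits ++ srest) pvKey hperm hpw,
    List.nil_append]

-- ===== VERDICT (by name: the statement is the Claim_ definition above) =====
theorem prioritize_topics_py_spec : Claim_equal_prioritize_topics_py := by
  intro topics _
  exact pv_main topics
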